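-- pv_equiv track=rewrite | github.com/aibelbin/arc-agi | tools/find_transformations.py | fit_affine_mod10
-- ===== SOURCE A (Python) =====
-- from typing import Dict, Iterable, List, Optional, Tuple
--
-- def fit_affine_mod10(mapping: Dict[int, int]) -> Optional[Tuple[int, int]]:
--     # Try all a,b in 0..9 for small domain, accept if holds for all seen x
--     if not mapping:
--         return None
--     domain = list(mapping.keys())
--     codomain = mapping
--     for a in range(10):
--         for b in range(10):
--             ok = True
--             for x in domain:
--                 y = codomain[x]
--                 if (a * x + b) % 10 != y:
--                     ok = False
--                     break
--             if ok:
--                 return a, b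
--     return None
-- ===== SOURCE B (Python) =====
-- def fit_affine_mod10(mapping):
--     # Closed-form b: anchor on the first key, derive b = (y0 - a*x0) % 10, then verify.
--     if not mapping:
--         return None
--     keys = list(mapping.keys())
--     x0 = keys[0]
--     y0 = mapping[x0]
--     for a in range(10):
--         b = (y0 - a * x0) % 10
--         if all((a * x + b) % 10 == mapping[x] for x in keys):
--             return a, b
--     return None
-- ===== Notes on version B (the rewrite author's own statement) =====
-- stated objective: simpler
-- what changed: The inner search over b in 0..9 (and its per-b domain scan) is replaced by a closed-form derivation: for each a, b is forced to (mapping[x0] - a*x0) % 10 by the first key x0, and a single all() pass verifies that one candidate pair.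
import Mathlib
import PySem

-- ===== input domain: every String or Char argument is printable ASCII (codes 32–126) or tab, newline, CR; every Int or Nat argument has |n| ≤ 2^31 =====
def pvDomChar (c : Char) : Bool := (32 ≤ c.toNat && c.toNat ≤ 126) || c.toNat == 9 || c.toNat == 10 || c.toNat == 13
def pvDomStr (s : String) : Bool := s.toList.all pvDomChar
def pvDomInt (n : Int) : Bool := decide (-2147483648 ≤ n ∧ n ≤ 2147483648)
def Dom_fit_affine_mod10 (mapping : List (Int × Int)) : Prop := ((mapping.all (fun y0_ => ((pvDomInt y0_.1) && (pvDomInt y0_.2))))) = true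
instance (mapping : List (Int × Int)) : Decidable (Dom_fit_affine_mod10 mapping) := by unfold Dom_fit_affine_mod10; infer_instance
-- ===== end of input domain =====

-- B replaces A's inner search over b in 0..9 by the closed-form forced b = (mapping[x0] - a*x0) % 10
-- derived from an anchor key, then a single verification pass per a (objective: simpler).

-- ===== PORT A =====
-- inner 'for x in domain' loop with break (ok flag)
def pvOkA (d : PySem.Dict Int Int) (a b : Int) : List Int → Bool
  | [] => true
  | x :: xs =>
    if PySem.Int.mod (a * x + b) 10 ≠ d.getD x 0 then false
    else pvOkA d a b xs

-- inner 'for b in range(10)' loop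
def pvInnerA (d : PySem.Dict Int Int) (domain : List Int) (a : Int) : List Int → Option (Int × Int)
  | [] => none
  | b :: bs =>
    if pvOkA d a b domain then some (a, b)
    else pvInnerA d domain a bs

-- outer 'for a in range(10)' loop
def pvOuterA (d : PySem.Dict Int Int) (domain : List Int) : List Int → Option (Int × Int)
  | [] => none
  | a :: as_ =>
    match pvInnerA d domain a (PySem.List.pyRange 0 10 1) with
    | some r => some r
    | none => pvOuterA d domain as_

def fit_affine_mod10 (mapping : List (Int × Int)) : Option (Int × Int) :=
  let d := PySem.Dict.ofList mapping
  if d.keys.isEmpty then none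
  else pvOuterA d d.keys (PySem.List.pyRange 0 10 1)

-- ===== PORT B =====
-- 'for a in range(10)' loop with closed-form b and an all(...) verification
def pvGoB (d : PySem.Dict Int Int) (keys : List Int) (x0 y0 : Int) : List Int → Option (Int × Int)
  | [] => none
  | a :: as_ =>
    let b := PySem.Int.mod (y0 - a * x0) 10
    if keys.all (fun x => PySem.Int.mod (a * x + b) 10 == d.getD x 0) then some (a, b)
    else pvGoB d keys x0 y0 as_

def fit_affine_mod10_alt (mapping : List (Int × Int)) : Option (Int × Int) :=
  let d := PySem.Dict.ofList mapping
  match d.keys with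
  | [] => none
  | x0 :: _ =>
    let y0 := d.getD x0 0
    pvGoB d d.keys x0 y0 (PySem.List.pyRange 0 10 1)

-- ===== PRECONDITION & SPEC =====
def Spec_fit_affine_mod10 (mapping : List (Int × Int)) (out : Option (Int × Int)) : Prop := out = fit_affine_mod10_alt mapping
instance (mapping : List (Int × Int)) (out : Option (Int × Int)) : Decidable (Spec_fit_affine_mod10 mapping out) := by unfold Spec_fit_affine_mod10; infer_instance

-- ===== CLAIM (what is proved, stated in full; the proofs are below) =====
def Claim_equal_fit_affine_mod10 : Prop := ∀ (mapping : List (Int × Int)), Dom_fit_affine_mod10 mapping → Spec_fit_affine_mod10 mapping (fit_affine_mod10 mapping)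

-- ===== LEMMAS AND PROOFS =====

def pvCheck (d : PySem.Dict Int Int) (dom : List Int) (a b : Int) : Bool :=
  dom.all (fun x => PySem.Int.mod (a * x + b) 10 == d.getD x 0)

theorem pvGoB_cons (d : PySem.Dict Int Int) (keys : List Int) (x0 y0 a : Int) (as_ : List Int) :
    pvGoB d keys x0 y0 (a :: as_) =
      (if pvCheck d keys a (PySem.Int.mod (y0 - a * x0) 10)
       then some (a, PySem.Int.mod (y0 - a * x0) 10)
       else pvGoB d keys x0 y0 as_) := rfl

theorem pvOkA_eq_check (d : PySem.Dict Int Int) (a b : Int) (dom : List Int) :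
    pvOkA d a b dom = pvCheck d dom a b := by
  induction dom with
  | nil => simp [pvOkA, pvCheck]
  | cons x xs ih =>
    simp only [pvOkA, pvCheck, List.all_cons] at *
    simp [ih]
    by_cases h2 : (a * x + b) % 10 = d.getD x 0 <;> simp [h2]

theorem pvCheck_forced (d : PySem.Dict Int Int) (x0 : Int) (rest : List Int) (a b : Int)
    (hb0 : 0 ≤ b) (hb1 : b < 10)
    (h : pvCheck d (x0 :: rest) a b = true) :
    b = PySem.Int.mod (d.getD x0 0 - a * x0) 10 := by
  have h0 : (a * x0 + b) % 10 = d.getD x0 0 := by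
    simp [pvCheck, List.all_cons] at h
    exact h.1
  rw [PySem.Int.mod_eq_emod_of_pos (by norm_num : (0:Int) < 10)]
  omega

theorem pvInnerA_char (d : PySem.Dict Int Int) (x0 : Int) (rest : List Int) (a : Int)
    (bs : List Int) (hbs : ∀ b ∈ bs, 0 ≤ b ∧ b < 10) :
    pvInnerA d (x0 :: rest) a bs =
      (if PySem.Int.mod (d.getD x0 0 - a * x0) 10 ∈ bs ∧
          pvCheck d (x0 :: rest) a (PySem.Int.mod (d.getD x0 0 - a * x0) 10) = true
       then some (a, PySem.Int.mod (d.getD x0 0 - a * x0) 10)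
       else none) := by
  induction bs with
  | nil => simp [pvInnerA]
  | cons b bs ih =>
    have hbr := hbs b (by simp)
    have hbs' : ∀ c ∈ bs, 0 ≤ c ∧ c < 10 := fun c hc => hbs c (by simp [hc])
    simp only [pvInnerA, pvOkA_eq_check]
    by_cases hch : pvCheck d (x0 :: rest) a b = true
    · have hforce : b = PySem.Int.mod (d.getD x0 0 - a * x0) 10 :=
        pvCheck_forced d x0 rest a b hbr.1 hbr.2 hch
      rw [if_pos hch, if_pos ⟨hforce ▸ List.mem_cons_self, hforce ▸ hch⟩, hforce]
    · rw [if_neg hch, ih hbs']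
      by_cases hch0 : pvCheck d (x0 :: rest) a (PySem.Int.mod (d.getD x0 0 - a * x0) 10) = true
      · by_cases hm : PySem.Int.mod (d.getD x0 0 - a * x0) 10 ∈ bs
        · rw [if_pos ⟨hm, hch0⟩, if_pos ⟨List.mem_cons_of_mem _ hm, hch0⟩]
        · rw [if_neg (fun hc => hm hc.1), if_neg]
          intro hc
          rcases List.mem_cons.mp hc.1 with heq | hmem
          · exact hch (heq ▸ hch0)
          · exact hm hmem
      · rw [if_neg (fun hc => hch0 hc.2), if_neg (fun hc => hch0 hc.2)]

theorem pvOuter_eq_go (d : PySem.Dict Int Int) (x0 : Int) (rest : List Int)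
    (as_ : List Int) :
    pvOuterA d (x0 :: rest) as_ = pvGoB d (x0 :: rest) x0 (d.getD x0 0) as_ := by
  induction as_ with
  | nil => rfl
  | cons a as_ ih =>
    have hbs : ∀ b ∈ PySem.List.pyRange 0 10 1, 0 ≤ b ∧ b < 10 := by
      intro b hb
      rw [PySem.List.mem_pyRange_one] at hb
      exact hb
    have hmem : PySem.Int.mod (d.getD x0 0 - a * x0) 10 ∈ PySem.List.pyRange 0 10 1 := by
      rw [PySem.List.mem_pyRange_one]
      exact ⟨PySem.Int.mod_nonneg _ (by norm_num), PySem.Int.mod_lt _ (by norm_num)⟩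
    rw [pvOuterA, pvGoB_cons, pvInnerA_char d x0 rest a _ hbs]
    by_cases hch : pvCheck d (x0 :: rest) a (PySem.Int.mod (d.getD x0 0 - a * x0) 10) = true
    · rw [if_pos ⟨hmem, hch⟩, if_pos hch]
    · rw [if_neg (fun hc => hch hc.2), if_neg hch]
      exact ih

-- ===== VERDICT (by name: the statement is the Claim_ definition above) =====
theorem fit_affine_mod10_spec : Claim_equal_fit_affine_mod10 := by
  intro mapping _
  show fit_affine_mod10 mapping = fit_affine_mod10_alt mapping
  have main : ∀ d : PySem.Dict Int Int,
      (if d.keys.isEmpty then none else pvOuterA d d.keys (PySem.List.pyRange 0 10 1)) =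
      (match d.keys with
       | [] => none
       | x0 :: _ => pvGoB d d.keys x0 (d.getD x0 0) (PySem.List.pyRange 0 10 1)) := by
    intro d
    match hk : d.keys with
    | [] => simp
    | x0 :: rest =>
      simp only [List.isEmpty_cons, Bool.false_eq_true, if_false]
      exact pvOuter_eq_go d x0 rest _
  exact main (PySem.Dict.ofList mapping)
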